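-- pv_equiv track=rewrite | github.com/JINL2/mystorecluade | myFinance_improved_V2/scripts/verify_widget_signatures.py | check_atomic_design_rules
-- ===== SOURCE A (Python) =====
-- from typing import List, Optional, Set
--
-- def check_atomic_design_rules(file_path: str, imports: List[str]) -> List[str]:
--     """Check Atomic Design dependency rules"""
--     errors = []
--
--     if '/atoms/' in file_path:
--         # Atoms should not import molecules or organisms
--         for imp in imports:
--             if 'molecules/' in imp or 'organisms/' in imp:
--                 errors.append(f"ATOMIC VIOLATION: Atom imports from higher level: {imp}")
--
--     elif '/molecules/' in file_path:
--         # Molecules should not import organisms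
--         for imp in imports:
--             if 'organisms/' in imp:
--                 errors.append(f"ATOMIC VIOLATION: Molecule imports from organisms: {imp}")
--
--     return errors
-- ===== SOURCE B (Python) =====
-- # B: rank-based lattice check: each import gets a numeric atomic level (highest
-- # layer name it mentions); a violation is simply "import level > file level".
-- LEVELS = ('atoms', 'molecules', 'organisms')
-- MESSAGES = ('ATOMIC VIOLATION: Atom imports from higher level: ',
--             'ATOMIC VIOLATION: Molecule imports from organisms: ')
--
-- def _import_level(imp):
--     # highest atomic-design layer the import reaches into (0 if none)
--     r = 0
--     for i, name in enumerate(LEVELS):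
--         if name + '/' in imp:
--             r = i
--     return r
--
-- def check_atomic_design_rules(file_path, imports):
--     for lvl, name in enumerate(LEVELS[:2]):
--         if '/' + name + '/' in file_path:
--             return [MESSAGES[lvl] + imp for imp in imports
--                     if _import_level(imp) > lvl]
--     return []
-- ===== Notes on version B (the rewrite author's own statement) =====
-- stated objective: alternative
-- what changed: Replaces A's per-branch forbidden-substring loops by a numeric lattice: each import is assigned the highest atomic-design level it mentions and a violation is the single comparison import-level > file-level, with one filter-and-format pass.
import Mathlib
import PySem

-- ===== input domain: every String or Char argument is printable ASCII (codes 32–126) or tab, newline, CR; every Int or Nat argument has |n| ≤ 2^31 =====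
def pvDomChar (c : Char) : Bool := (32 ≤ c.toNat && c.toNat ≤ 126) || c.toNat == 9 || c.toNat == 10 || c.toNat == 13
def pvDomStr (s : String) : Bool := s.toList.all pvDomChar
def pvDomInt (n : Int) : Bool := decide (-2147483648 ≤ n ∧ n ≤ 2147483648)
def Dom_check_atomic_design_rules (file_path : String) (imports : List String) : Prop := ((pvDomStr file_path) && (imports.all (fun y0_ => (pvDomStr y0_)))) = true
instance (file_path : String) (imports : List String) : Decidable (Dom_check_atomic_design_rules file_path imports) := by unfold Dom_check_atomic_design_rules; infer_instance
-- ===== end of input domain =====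

-- B replaces A's per-branch forbidden-substring loops by a numeric lattice check:
-- each import gets the highest atomic-design level it mentions, and a violation
-- is the single comparison import-level > file-level (one filter-and-format pass).
-- ===== PORT A =====
def check_atomic_design_rules (file_path : String) (imports : List String) : List String :=
  if PySem.Str.isIn "/atoms/" file_path then
    imports.foldl (fun errors imp =>
      if PySem.Str.isIn "molecules/" imp || PySem.Str.isIn "organisms/" imp then
        errors ++ ["ATOMIC VIOLATION: Atom imports from higher level: " ++ imp]
      else errors) []
  else if PySem.Str.isIn "/molecules/" file_path then
    imports.foldl (fun errors imp =>
      if PySem.Str.isIn "organisms/" imp then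
        errors ++ ["ATOMIC VIOLATION: Molecule imports from organisms: " ++ imp]
      else errors) []
  else []

-- ===== PORT B =====
def pvLevels : List String := ["atoms", "molecules", "organisms"]

def pvMessages : List String :=
  ["ATOMIC VIOLATION: Atom imports from higher level: ",
   "ATOMIC VIOLATION: Molecule imports from organisms: "]

-- highest atomic-design layer the import reaches into (0 if none)
def pvImportLevel (imp : String) : Nat :=
  pvLevels.zipIdx.foldl
    (fun r p => if PySem.Str.isIn (p.1 ++ "/") imp then p.2 else r) 0

def check_atomic_design_rules_alt (file_path : String) (imports : List String) : List String :=
  match (pvLevels.take 2).zipIdx.find?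
      (fun p => PySem.Str.isIn ("/" ++ p.1 ++ "/") file_path) with
  | some (_, lvl) =>
      (imports.filter (fun imp => lvl < pvImportLevel imp)).map
        (fun imp => pvMessages.getD lvl "" ++ imp)
  | none => []

-- ===== PRECONDITION & SPEC =====
def Spec_check_atomic_design_rules (file_path : String) (imports : List String) (out : List String) : Prop := out = check_atomic_design_rules_alt file_path imports
instance (file_path : String) (imports : List String) (out : List String) : Decidable (Spec_check_atomic_design_rules file_path imports out) := by unfold Spec_check_atomic_design_rules; infer_instance

-- ===== CLAIM (what is proved, stated in full; the proofs are below) =====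
def Claim_equal_check_atomic_design_rules : Prop := ∀ (file_path : String) (imports : List String), Dom_check_atomic_design_rules file_path imports → Spec_check_atomic_design_rules file_path imports (check_atomic_design_rules file_path imports)

-- ===== LEMMAS AND PROOFS =====

-- A's 'if p(x): out.append(f(x))' accumulation equals map-over-filter.
theorem pv_foldl_append_if_bool {α β : Type} (p : α → Bool) (f : α → β) :
    ∀ (l : List α) (acc : List β),
      l.foldl (fun acc x => if p x then acc ++ [f x] else acc) acc
        = acc ++ (l.filter p).map f
  | [], acc => by simp
  | x :: t, acc => by
      simp only [List.foldl_cons, List.filter_cons]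
      cases p x <;> simp [pv_foldl_append_if_bool p f t]

theorem pv_rank_bool (a m o : Bool) (lvl : Nat) (hl : lvl = 0 ∨ lvl = 1) :
    (decide (lvl < (if o then 2 else if m then 1 else if a then 0 else 0)))
      = (if lvl = 0 then m || o else o) := by
  rcases hl with rfl | rfl <;> cases a <;> cases m <;> cases o <;> simp

theorem pvTestAtom (imp : String) :
    (decide (0 < pvImportLevel imp))
      = (PySem.Str.isIn "molecules/" imp || PySem.Str.isIn "organisms/" imp) := by
  have h := pv_rank_bool (PySem.Str.isIn ("atoms" ++ "/") imp)
    (PySem.Str.isIn ("molecules" ++ "/") imp)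
    (PySem.Str.isIn ("organisms" ++ "/") imp) 0 (Or.inl rfl)
  simpa [pvImportLevel, pvLevels, List.zipIdx] using h

theorem pvTestMol (imp : String) :
    (decide (1 < pvImportLevel imp)) = PySem.Str.isIn "organisms/" imp := by
  have h := pv_rank_bool (PySem.Str.isIn ("atoms" ++ "/") imp)
    (PySem.Str.isIn ("molecules" ++ "/") imp)
    (PySem.Str.isIn ("organisms" ++ "/") imp) 1 (Or.inr rfl)
  simpa [pvImportLevel, pvLevels, List.zipIdx] using h

theorem pvAltAtom (fp : String) (imports : List String)
    (h1 : PySem.Str.isIn "/atoms/" fp = true) :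
    check_atomic_design_rules_alt fp imports
      = (imports.filter (fun imp => decide (0 < pvImportLevel imp))).map
          (fun imp => "ATOMIC VIOLATION: Atom imports from higher level: " ++ imp) := by
  unfold check_atomic_design_rules_alt
  simp [PySem.Str.isIn] at h1
  simp [pvLevels, pvMessages, List.zipIdx, PySem.Str.isIn, h1]

theorem pvAltMol (fp : String) (imports : List String)
    (h1 : ¬ PySem.Str.isIn "/atoms/" fp = true)
    (h2 : PySem.Str.isIn "/molecules/" fp = true) :
    check_atomic_design_rules_alt fp imports
      = (imports.filter (fun imp => decide (1 < pvImportLevel imp))).map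
          (fun imp => "ATOMIC VIOLATION: Molecule imports from organisms: " ++ imp) := by
  unfold check_atomic_design_rules_alt
  simp [PySem.Str.isIn] at h1 h2
  simp [pvLevels, pvMessages, List.zipIdx, PySem.Str.isIn, h1, h2]

theorem pvAltNone (fp : String) (imports : List String)
    (h1 : ¬ PySem.Str.isIn "/atoms/" fp = true)
    (h2 : ¬ PySem.Str.isIn "/molecules/" fp = true) :
    check_atomic_design_rules_alt fp imports = [] := by
  unfold check_atomic_design_rules_alt
  simp [PySem.Str.isIn] at h1 h2
  simp [pvLevels, List.zipIdx, PySem.Str.isIn, h1, h2]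

-- ===== VERDICT (by name: the statement is the Claim_ definition above) =====
theorem check_atomic_design_rules_spec : Claim_equal_check_atomic_design_rules := by
  intro file_path imports _
  unfold Spec_check_atomic_design_rules check_atomic_design_rules
  by_cases h1 : PySem.Str.isIn "/atoms/" file_path = true
  · rw [if_pos h1, pvAltAtom file_path imports h1]
    calc imports.foldl (fun errors imp =>
            if PySem.Str.isIn "molecules/" imp || PySem.Str.isIn "organisms/" imp then
              errors ++ ["ATOMIC VIOLATION: Atom imports from higher level: " ++ imp]
            else errors) []
        = [] ++ (imports.filter
              (fun imp => PySem.Str.isIn "molecules/" imp || PySem.Str.isIn "organisms/" imp)).map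
              (fun imp => "ATOMIC VIOLATION: Atom imports from higher level: " ++ imp) :=
          pv_foldl_append_if_bool _ _ imports []
      _ = _ := by
          rw [List.nil_append,
              List.filter_congr (fun imp _ => (pvTestAtom imp).symm)]
  · rw [if_neg h1]
    by_cases h2 : PySem.Str.isIn "/molecules/" file_path = true
    · rw [if_pos h2, pvAltMol file_path imports h1 h2]
      calc imports.foldl (fun errors imp =>
              if PySem.Str.isIn "organisms/" imp then
                errors ++ ["ATOMIC VIOLATION: Molecule imports from organisms: " ++ imp]
              else errors) []
          = [] ++ (imports.filter (fun imp => PySem.Str.isIn "organisms/" imp)).map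
                (fun imp => "ATOMIC VIOLATION: Molecule imports from organisms: " ++ imp) :=
            pv_foldl_append_if_bool _ _ imports []
        _ = _ := by
            rw [List.nil_append,
                List.filter_congr (fun imp _ => (pvTestMol imp).symm)]
    · rw [if_neg h2, pvAltNone file_path imports h1 h2]
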